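-- pv_equiv track=rewrite | github.com/BioGeMT/ParaDISM | src/pipeline/mapper_algo.py | map_insertions_dp
-- ===== SOURCE A (Python) =====
-- from typing import Dict, List, Tuple
--
-- def map_insertions_dp(insertions: List[Tuple], valid_gaps: List[Tuple], max_scenarios: int = 100) -> List[List]:
--     memo = {}
--
--     def dp(i: int, j: int) -> Tuple[int, List]:
--         if i == len(insertions) or j == len(valid_gaps):
--             return (0, [[]])
--
--         if (i, j) in memo:
--             return memo[(i, j)]
--
--         count1, mappings1 = dp(i+1, j)
--         count2, mappings2 = dp(i, j+1)
--
--         insertion_base = insertions[i][1].upper()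
--         gap_valid_bases = valid_gaps[j][1]
--         if insertion_base in gap_valid_bases:
--             count3, mappings3 = dp(i+1, j+1)
--             count3 += 1
--             new_mappings3 = [[(insertions[i][0], valid_gaps[j][0])] + m for m in mappings3]
--         else:
--             count3, new_mappings3 = (0, [])
--
--         max_count = max(count1, count2, count3)
--         mappings = []
--         if count1 == max_count:
--             mappings.extend(mappings1)
--         if count2 == max_count:
--             mappings.extend(mappings2)
--         if count3 == max_count:
--             mappings.extend(new_mappings3)
--
--         if len(mappings) > max_scenarios:
--             mappings = mappings[:max_scenarios]
--
--         memo[(i, j)] = (max_count, mappings)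
--         return memo[(i, j)]
--
--     max_mapped, all_mappings = dp(0, 0)
--
--     unique_mappings = []
--     seen = set()
--     for m in all_mappings[:max_scenarios]:
--         m_sorted = tuple(sorted(m))
--         if m_sorted not in seen:
--             seen.add(m_sorted)
--             unique_mappings.append(m)
--             if len(unique_mappings) >= max_scenarios:
--                 break
--
--     memo.clear()
--     return unique_mappings
-- ===== SOURCE B (Python) =====
-- def map_insertions_dp(insertions, valid_gaps, max_scenarios=100):
--     # Bottom-up tabulation (one row of the (n+1)x(m+1) table kept at a time)
--     # instead of A's memoized recursion; identical per-cell combination and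
--     # identical first-seen dedup postpass.
--     n, m = len(insertions), len(valid_gaps)
--     below = [(0, [[]]) for _ in range(m + 1)]          # row i = n
--     for i in range(n - 1, -1, -1):
--         row = [(0, [[]])]                              # cell (i, m)
--         ins_pos, ins_base = insertions[i]
--         base = ins_base.upper()
--         for j in range(m - 1, -1, -1):
--             c1, m1 = below[j]                          # (i+1, j)
--             c2, m2 = row[0]                            # (i, j+1)
--             if base in valid_gaps[j][1]:
--                 c3raw, m3raw = below[j + 1]            # (i+1, j+1)
--                 c3 = c3raw + 1
--                 m3 = [[(ins_pos, valid_gaps[j][0])] + t for t in m3raw]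
--             else:
--                 c3, m3 = 0, []
--             best = max(c1, c2, c3)
--             ms = []
--             if c1 == best:
--                 ms.extend(m1)
--             if c2 == best:
--                 ms.extend(m2)
--             if c3 == best:
--                 ms.extend(m3)
--             if len(ms) > max_scenarios:
--                 ms = ms[:max_scenarios]
--             row = [(best, ms)] + row
--         below = row
--     all_mappings = below[0][1]
--
--     unique_mappings = []
--     seen = set()
--     for mm in all_mappings[:max_scenarios]:
--         key = tuple(sorted(mm))
--         if key not in seen:
--             seen.add(key)
--             unique_mappings.append(mm)
--             if len(unique_mappings) >= max_scenarios:
--                 break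
--     return unique_mappings
-- ===== Notes on version B (the rewrite author's own statement) =====
-- stated objective: alternative
-- what changed: Replaces A's memoized top-down recursion (dict-keyed dp(i,j)) by bottom-up row-by-row tabulation keeping only one row of the (n+1)x(m+1) table, with the identical per-cell combination and the identical first-seen dedup postpass.
import Mathlib
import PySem

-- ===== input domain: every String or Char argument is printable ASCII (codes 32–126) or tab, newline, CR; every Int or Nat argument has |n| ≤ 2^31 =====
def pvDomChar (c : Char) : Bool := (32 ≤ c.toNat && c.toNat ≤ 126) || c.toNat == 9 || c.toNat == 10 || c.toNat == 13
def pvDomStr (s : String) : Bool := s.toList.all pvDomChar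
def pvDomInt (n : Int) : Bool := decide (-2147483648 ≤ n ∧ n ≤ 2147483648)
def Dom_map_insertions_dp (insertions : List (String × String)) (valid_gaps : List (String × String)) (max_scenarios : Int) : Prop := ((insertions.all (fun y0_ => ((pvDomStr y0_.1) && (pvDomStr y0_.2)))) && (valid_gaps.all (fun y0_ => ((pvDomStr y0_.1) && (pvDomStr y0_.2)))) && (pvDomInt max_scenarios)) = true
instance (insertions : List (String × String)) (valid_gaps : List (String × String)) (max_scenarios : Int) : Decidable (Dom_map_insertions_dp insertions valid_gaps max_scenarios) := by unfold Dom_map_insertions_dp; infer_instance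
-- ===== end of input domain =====

-- B replaces A's memoized top-down recursion by bottom-up row-by-row tabulation
-- (same per-cell combination, same dedup postpass); objective: alternative decomposition.

-- Shared postpass: the final first-seen dedup loop, textually identical in Source A and Source B
-- (for m in all_mappings[:max_scenarios]: key = tuple(sorted(m)); if key not in seen: …).
def pvDedup (maxS : Int) (seen : PySem.Set (List (String × String)))
    (uniq : List (List (String × String))) :
    List (List (String × String)) → List (List (String × String))
  | [] => uniq
  | mm :: rest =>
    let key := PySem.List.sorted2 mm Prod.fst Prod.snd
    if PySem.Set.contains seen key then pvDedup maxS seen uniq rest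
    else
      let uniq' := uniq ++ [mm]
      if (uniq'.length : Int) ≥ maxS then uniq'
      else pvDedup maxS (PySem.Set.add seen key) uniq' rest

-- ===== PORT A =====
-- dp(i, j) of Source A as fuel-indexed recursion (the fuel only makes the recursion
-- structural: at every reachable call fuel ≥ (n-i)+(m-j), so the 0-fuel branch —
-- which returns the same value as the base case — is never the deciding one;
-- the memo dict of Source A caches a pure function and is dropped in the port).
def pvDpA (insertions valid_gaps : List (String × String)) (max_scenarios : Int) :
    Nat → Nat → Nat → Int × List (List (String × String))
  | 0, _, _ => (0, [[]])
  | fuel + 1, i, j =>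
    if i = insertions.length ∨ j = valid_gaps.length then (0, [[]])
    else
      let r1 := pvDpA insertions valid_gaps max_scenarios fuel (i + 1) j
      let r2 := pvDpA insertions valid_gaps max_scenarios fuel i (j + 1)
      let insertionBase := PySem.Str.upper (PySem.List.pyGetD insertions (i : Int) ("", "")).2
      let gapValidBases := (PySem.List.pyGetD valid_gaps (j : Int) ("", "")).2
      let r3 :=
        if PySem.Str.isIn insertionBase gapValidBases then
          let r := pvDpA insertions valid_gaps max_scenarios fuel (i + 1) (j + 1)
          (r.1 + 1, r.2.map (fun mm =>
            ((PySem.List.pyGetD insertions (i : Int) ("", "")).1,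
             (PySem.List.pyGetD valid_gaps (j : Int) ("", "")).1) :: mm))
        else ((0 : Int), ([] : List (List (String × String))))
      let maxCount := max r1.1 (max r2.1 r3.1)
      let mappings :=
        (if r1.1 = maxCount then r1.2 else []) ++
        (if r2.1 = maxCount then r2.2 else []) ++
        (if r3.1 = maxCount then r3.2 else [])
      let mappings :=
        if (mappings.length : Int) > max_scenarios then
          PySem.List.slice mappings none (some max_scenarios)
        else mappings
      (maxCount, mappings)

def map_insertions_dp (insertions : List (String × String)) (valid_gaps : List (String × String)) (max_scenarios : Int) : List (List (String × String)) :=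
  let r := pvDpA insertions valid_gaps max_scenarios (insertions.length + valid_gaps.length) 0 0
  pvDedup max_scenarios PySem.Set.empty [] (PySem.List.slice r.2 none (some max_scenarios))

-- ===== PORT B =====
-- one table cell (i, j) of Source B, computed from the row below and the already-built
-- tail of the current row (row[0] = cell (i, j+1), below[j] = cell (i+1, j), below[j+1] = cell (i+1, j+1))
def pvCellB (insertions valid_gaps : List (String × String)) (max_scenarios : Int)
    (i j : Nat) (below row : List (Int × List (List (String × String)))) :
    Int × List (List (String × String)) :=
  let r1 := PySem.List.pyGetD below (j : Int) (0, [[]])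
  let r2 := PySem.List.pyGetD row 0 (0, [[]])
  let base := PySem.Str.upper (PySem.List.pyGetD insertions (i : Int) ("", "")).2
  let r3 :=
    if PySem.Str.isIn base (PySem.List.pyGetD valid_gaps (j : Int) ("", "")).2 then
      let r := PySem.List.pyGetD below ((j : Int) + 1) (0, [[]])
      (r.1 + 1, r.2.map (fun mm =>
        ((PySem.List.pyGetD insertions (i : Int) ("", "")).1,
         (PySem.List.pyGetD valid_gaps (j : Int) ("", "")).1) :: mm))
    else ((0 : Int), ([] : List (List (String × String))))
  let best := max r1.1 (max r2.1 r3.1)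
  let ms :=
    (if r1.1 = best then r1.2 else []) ++
    (if r2.1 = best then r2.2 else []) ++
    (if r3.1 = best then r3.2 else [])
  let ms :=
    if (ms.length : Int) > max_scenarios then PySem.List.slice ms none (some max_scenarios)
    else ms
  (best, ms)

-- inner loop of Source B: for j in range(m-1, -1, -1): row = [cell] + row
-- (range(m-1,-1,-1) enumerates (List.range m).reverse)
def pvRowB (insertions valid_gaps : List (String × String)) (max_scenarios : Int)
    (i : Nat) (below : List (Int × List (List (String × String)))) :
    List (Int × List (List (String × String))) :=
  (List.range valid_gaps.length).reverse.foldl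
    (fun row j => pvCellB insertions valid_gaps max_scenarios i j below row :: row)
    [(0, [[]])]

def map_insertions_dp_alt (insertions : List (String × String)) (valid_gaps : List (String × String)) (max_scenarios : Int) : List (List (String × String)) :=
  let below0 : List (Int × List (List (String × String))) :=
    List.replicate (valid_gaps.length + 1) (0, [[]])
  let final := (List.range insertions.length).reverse.foldl
    (fun below i => pvRowB insertions valid_gaps max_scenarios i below) below0
  let allMappings := (PySem.List.pyGetD final 0 (0, [[]])).2
  pvDedup max_scenarios PySem.Set.empty [] (PySem.List.slice allMappings none (some max_scenarios))

-- ===== PRECONDITION & SPEC =====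
def Spec_map_insertions_dp (insertions : List (String × String)) (valid_gaps : List (String × String)) (max_scenarios : Int) (out : List (List (String × String))) : Prop := out = map_insertions_dp_alt insertions valid_gaps max_scenarios
instance (insertions : List (String × String)) (valid_gaps : List (String × String)) (max_scenarios : Int) (out : List (List (String × String))) : Decidable (Spec_map_insertions_dp insertions valid_gaps max_scenarios out) := by unfold Spec_map_insertions_dp; infer_instance

-- ===== CLAIM (what is proved, stated in full; the proofs are below) =====
def Claim_equal_map_insertions_dp : Prop := ∀ (insertions : List (String × String)) (valid_gaps : List (String × String)) (max_scenarios : Int), Dom_map_insertions_dp insertions valid_gaps max_scenarios → Spec_map_insertions_dp insertions valid_gaps max_scenarios (map_insertions_dp insertions valid_gaps max_scenarios)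

-- ===== LEMMAS AND PROOFS =====

theorem pvDpA_fuel_irrel (ins gaps : List (String × String)) (maxS : Int) :
    ∀ fuel₁ fuel₂ i j, i ≤ ins.length → j ≤ gaps.length →
      (ins.length - i) + (gaps.length - j) ≤ fuel₁ →
      (ins.length - i) + (gaps.length - j) ≤ fuel₂ →
      pvDpA ins gaps maxS fuel₁ i j = pvDpA ins gaps maxS fuel₂ i j := by
  intro fuel₁
  induction fuel₁ with
  | zero =>
    intro fuel₂ i j hi hj h1 h2
    have hin : i = ins.length := by omega
    cases fuel₂ with
    | zero => rfl
    | succ f => simp [pvDpA, hin]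
  | succ f ih =>
    intro fuel₂ i j hi hj h1 h2
    cases fuel₂ with
    | zero =>
      have hin : i = ins.length := by omega
      simp [pvDpA, hin]
    | succ f₂ =>
      by_cases hg : i = ins.length ∨ j = gaps.length
      · simp only [pvDpA, if_pos hg]
      · have hi' : i < ins.length := by omega
        have hj' : j < gaps.length := by omega
        simp only [pvDpA, if_neg hg]
        rw [ih f₂ (i+1) j (by omega) (by omega) (by omega) (by omega),
            ih f₂ i (j+1) (by omega) (by omega) (by omega) (by omega),
            ih f₂ (i+1) (j+1) (by omega) (by omega) (by omega) (by omega)]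

def pvF (ins gaps : List (String × String)) (maxS : Int) (i j : Nat) :
    Int × List (List (String × String)) :=
  pvDpA ins gaps maxS (ins.length + gaps.length) i j

theorem pvF_base (ins gaps : List (String × String)) (maxS : Int) (i j : Nat)
    (h : i = ins.length ∨ j = gaps.length) :
    pvF ins gaps maxS i j = (0, [[]]) := by
  unfold pvF
  cases hf : ins.length + gaps.length with
  | zero => rfl
  | succ f => simp only [pvDpA, if_pos h]

theorem pvF_eq (ins gaps : List (String × String)) (maxS : Int) (i j : Nat)
    (hi : i < ins.length) (hj : j < gaps.length) :
    pvF ins gaps maxS i j =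
      (let r1 := pvF ins gaps maxS (i + 1) j
       let r2 := pvF ins gaps maxS i (j + 1)
       let insertionBase := PySem.Str.upper (PySem.List.pyGetD ins (i : Int) ("", "")).2
       let gapValidBases := (PySem.List.pyGetD gaps (j : Int) ("", "")).2
       let r3 :=
         if PySem.Str.isIn insertionBase gapValidBases then
           let r := pvF ins gaps maxS (i + 1) (j + 1)
           (r.1 + 1, r.2.map (fun mm =>
             ((PySem.List.pyGetD ins (i : Int) ("", "")).1,
              (PySem.List.pyGetD gaps (j : Int) ("", "")).1) :: mm))
         else ((0 : Int), ([] : List (List (String × String))))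
       let maxCount := max r1.1 (max r2.1 r3.1)
       let mappings :=
         (if r1.1 = maxCount then r1.2 else []) ++
         (if r2.1 = maxCount then r2.2 else []) ++
         (if r3.1 = maxCount then r3.2 else [])
       let mappings :=
         if (mappings.length : Int) > maxS then
           PySem.List.slice mappings none (some maxS)
         else mappings
       (maxCount, mappings)) := by
  obtain ⟨f, hf⟩ : ∃ f, ins.length + gaps.length = f + 1 := ⟨ins.length + gaps.length - 1, by omega⟩
  have hrec : ∀ i' j', i' ≤ ins.length → j' ≤ gaps.length → i + j < i' + j' →
      pvDpA ins gaps maxS f i' j' = pvF ins gaps maxS i' j' := by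
    intro i' j' h1 h2 h3
    exact pvDpA_fuel_irrel ins gaps maxS f (ins.length + gaps.length) i' j' h1 h2 (by omega) (by omega)
  conv_lhs => rw [pvF, hf]
  simp only [pvDpA, if_neg (by omega : ¬ (i = ins.length ∨ j = gaps.length))]
  rw [hrec (i+1) j (by omega) (by omega) (by omega),
      hrec i (j+1) (by omega) (by omega) (by omega),
      hrec (i+1) (j+1) (by omega) (by omega) (by omega)]

theorem pvCellB_eq (ins gaps : List (String × String)) (maxS : Int) (i j : Nat)
    (hi : i < ins.length) (hj : j < gaps.length)
    (below row : List (Int × List (List (String × String))))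
    (hb : below = (List.range (gaps.length + 1)).map (pvF ins gaps maxS (i + 1)))
    (hr : row = (List.range' (j + 1) (gaps.length - j)).map (pvF ins gaps maxS i)) :
    pvCellB ins gaps maxS i j below row = pvF ins gaps maxS i j := by
  subst hb hr
  have hget1 : PySem.List.pyGetD ((List.range (gaps.length + 1)).map (pvF ins gaps maxS (i + 1))) (j : Int) ((0:Int), [[]])
      = pvF ins gaps maxS (i + 1) j := by
    rw [PySem.List.pyGetD_natCast, PySem.List.getD_map_range _ _ _ _ (by omega)]
  have hget3 : PySem.List.pyGetD ((List.range (gaps.length + 1)).map (pvF ins gaps maxS (i + 1))) ((j : Int) + 1) ((0:Int), [[]])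
      = pvF ins gaps maxS (i + 1) (j + 1) := by
    rw [show ((j : Int) + 1) = (((j + 1 : Nat)) : Int) by push_cast; ring,
        PySem.List.pyGetD_natCast, PySem.List.getD_map_range _ _ _ _ (by omega)]
  have hget2 : PySem.List.pyGetD ((List.range' (j + 1) (gaps.length - j)).map (pvF ins gaps maxS i)) 0 ((0:Int), [[]])
      = pvF ins gaps maxS i (j + 1) := by
    rw [show gaps.length - j = (gaps.length - j - 1) + 1 by omega, List.range'_succ, List.map_cons,
        PySem.List.pyGetD_zero_cons]
  rw [pvF_eq ins gaps maxS i j hi hj]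
  unfold pvCellB
  rw [hget1, hget2, hget3]
theorem pvRowB_eq (ins gaps : List (String × String)) (maxS : Int) (i : Nat)
    (hi : i < ins.length)
    (below : List (Int × List (List (String × String))))
    (hb : below = (List.range (gaps.length + 1)).map (pvF ins gaps maxS (i + 1))) :
    pvRowB ins gaps maxS i below = (List.range (gaps.length + 1)).map (pvF ins gaps maxS i) := by
  have aux : ∀ k, k ≤ gaps.length →
      (List.range' (gaps.length - k) k).reverse.foldl
        (fun row j => pvCellB ins gaps maxS i j below row :: row) [(0, [[]])]
      = (List.range' (gaps.length - k) (k + 1)).map (pvF ins gaps maxS i) := by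
    intro k
    induction k with
    | zero =>
      intro _
      simp [List.range'_succ, pvF_base ins gaps maxS i gaps.length (Or.inr rfl)]
    | succ k ihk =>
      intro hk
      have h1 : gaps.length - (k + 1) + 1 = gaps.length - k := by omega
      have hsplit : List.range' (gaps.length - (k + 1)) (k + 1)
          = (gaps.length - (k + 1)) :: List.range' (gaps.length - k) k := by
        rw [List.range'_succ, h1]
      rw [hsplit, List.reverse_cons, List.foldl_append, ihk (by omega)]
      simp only [List.foldl_cons, List.foldl_nil]
      rw [pvCellB_eq ins gaps maxS i (gaps.length - (k + 1)) hi (by omega) below _ hb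
            (by rw [show gaps.length - (gaps.length - (k + 1)) = k + 1 by omega, h1])]
      rw [show k + 1 + 1 = (k + 1) + 1 from rfl]
      conv_rhs => rw [List.range'_succ, h1]
      rw [List.map_cons]
  have h := aux gaps.length (le_refl _)
  simp only [Nat.sub_self, ← List.range_eq_range'] at h
  rw [pvRowB]
  exact h

theorem pvTable_eq (ins gaps : List (String × String)) (maxS : Int) :
    (List.range ins.length).reverse.foldl
      (fun below i => pvRowB ins gaps maxS i below)
      (List.replicate (gaps.length + 1) (0, [[]]))
      = (List.range (gaps.length + 1)).map (pvF ins gaps maxS 0) := by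
  have hbase : (List.replicate (gaps.length + 1) ((0:Int), [([] : List (String × String))]))
      = (List.range (gaps.length + 1)).map (pvF ins gaps maxS ins.length) := by
    have : ∀ j ∈ List.range (gaps.length + 1),
        pvF ins gaps maxS ins.length j = (0, [[]]) := fun j _ =>
      pvF_base ins gaps maxS ins.length j (Or.inl rfl)
    rw [List.map_congr_left this, List.map_const', List.length_range]
  have aux : ∀ k, k ≤ ins.length →
      (List.range' (ins.length - k) k).reverse.foldl
        (fun below i => pvRowB ins gaps maxS i below)
        (List.replicate (gaps.length + 1) (0, [[]]))
      = (List.range (gaps.length + 1)).map (pvF ins gaps maxS (ins.length - k)) := by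
    intro k
    induction k with
    | zero =>
      intro _
      simpa using hbase
    | succ k ihk =>
      intro hk
      have h1 : ins.length - (k + 1) + 1 = ins.length - k := by omega
      have hsplit : List.range' (ins.length - (k + 1)) (k + 1)
          = (ins.length - (k + 1)) :: List.range' (ins.length - k) k := by
        rw [List.range'_succ, h1]
      rw [hsplit, List.reverse_cons, List.foldl_append, ihk (by omega)]
      simp only [List.foldl_cons, List.foldl_nil]
      rw [pvRowB_eq ins gaps maxS (ins.length - (k + 1)) (by omega) _ (by rw [h1])]
  have := aux ins.length (le_refl _)
  rw [Nat.sub_self] at this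
  rw [← List.range_eq_range'] at this
  exact this

-- ===== VERDICT (by name: the statement is the Claim_ definition above) =====
theorem map_insertions_dp_spec : Claim_equal_map_insertions_dp := by
  intro ins gaps maxS _
  show map_insertions_dp ins gaps maxS = map_insertions_dp_alt ins gaps maxS
  show pvDedup maxS PySem.Set.empty []
      (PySem.List.slice (pvDpA ins gaps maxS (ins.length + gaps.length) 0 0).2 none (some maxS))
    = pvDedup maxS PySem.Set.empty []
      (PySem.List.slice (PySem.List.pyGetD
          ((List.range ins.length).reverse.foldl
            (fun below i => pvRowB ins gaps maxS i below)
            (List.replicate (gaps.length + 1) (0, [[]]))) 0 (0, [[]])).2 none (some maxS))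
  rw [pvTable_eq ins gaps maxS,
      show ((0 : Int)) = ((0 : Nat) : Int) from rfl, PySem.List.pyGetD_natCast,
      PySem.List.getD_map_range _ _ _ _ (by omega)]
  rfl
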